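-- pv_equiv track=rewrite | github.com/saint2706/Pro-g-rammingChallenges4 | challenges/Algorithmic/Caesar Cipher/cipher_visualizer.py | _build_substitution_matrix
-- ===== SOURCE A (Python) =====
-- import string
-- from typing import Dict, Iterable, List, Optional
--
-- ALPHABET: List[str] = list(string.ascii_uppercase)
--
-- def _build_substitution_matrix(mappings: Iterable[Dict[str, str]]) -> List[List[int]]:
--     matrix = [[0 for _ in ALPHABET] for _ in ALPHABET]
--     for mapping in mappings:
--         for src, dst in mapping.items():
--             if src not in ALPHABET or dst not in ALPHABET:
--                 continue
--             i = ord(src) - ord("A")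
--             j = ord(dst) - ord("A")
--             matrix[i][j] += 1
--     return matrix
-- ===== SOURCE B (Python) =====
-- import string
-- from typing import Dict, Iterable, List
--
-- ALPHABET: List[str] = list(string.ascii_uppercase)
--
-- def _build_substitution_matrix(mappings: Iterable[Dict[str, str]]) -> List[List[int]]:
--     # No accumulation at all: flatten to the valid (src, dst) pairs once, then
--     # compute every cell independently by scanning that list with list.count.
--     pairs = [(src, dst)
--              for mapping in mappings
--              for src, dst in mapping.items()
--              if src in ALPHABET and dst in ALPHABET]
--     return [[pairs.count((chr(65 + i), chr(65 + j))) for j in range(26)]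
--             for i in range(26)]
-- ===== Notes on version B (the rewrite author's own statement) =====
-- stated objective: alternative
-- what changed: A builds a 26x26 grid and increments cells in place during one traversal; B flattens the mappings into the list of valid (src,dst) pairs and then computes every matrix cell independently by counting occurrences of that letter pair in the list, trading the accumulator for per-cell rescans.
import Mathlib
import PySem

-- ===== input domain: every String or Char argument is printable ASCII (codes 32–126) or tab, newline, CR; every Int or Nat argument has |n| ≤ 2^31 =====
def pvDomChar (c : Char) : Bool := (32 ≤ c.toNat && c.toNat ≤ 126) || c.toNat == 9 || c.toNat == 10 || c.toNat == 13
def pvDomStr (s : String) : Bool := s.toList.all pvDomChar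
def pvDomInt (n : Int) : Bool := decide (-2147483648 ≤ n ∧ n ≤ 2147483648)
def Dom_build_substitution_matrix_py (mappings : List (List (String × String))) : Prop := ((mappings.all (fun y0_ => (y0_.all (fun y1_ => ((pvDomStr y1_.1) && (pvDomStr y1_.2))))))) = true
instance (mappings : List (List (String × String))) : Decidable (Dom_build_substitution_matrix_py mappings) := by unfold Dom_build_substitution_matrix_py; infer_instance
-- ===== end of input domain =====

-- B replaces A's in-place 26x26 accumulation by flattening to the valid pair list
-- and counting each cell independently with list.count (objective: alternative).

-- ALPHABET = list(string.ascii_uppercase)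
def pvAlphabet : List String :=
  ["A","B","C","D","E","F","G","H","I","J","K","L","M",
   "N","O","P","Q","R","S","T","U","V","W","X","Y","Z"]

-- ord(s) for a single-character string (both ports apply it only to strings
-- that passed the ALPHABET membership filter, i.e. single uppercase letters).
def pvOrd (s : String) : Int :=
  match s.toList with
  | [c] => (c.toNat : Int)
  | _ => 0

-- chr(n); exact for the code points 65..90 B uses it on.
def pvChr (n : Int) : String := String.ofList [Char.ofNat n.toNat]

-- ===== PORT A =====
-- body of A's inner loop: skip invalid pairs, else matrix[i][j] += 1
-- (i, j are in [0, 26) after the filter, so Int.toNat is exact here; 65 = ord("A"))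
def pvStepA (matrix : List (List Int)) (p : String × String) : List (List Int) :=
  if !(pvAlphabet.contains p.1) || !(pvAlphabet.contains p.2) then matrix
  else
    let i := pvOrd p.1 - 65
    let j := pvOrd p.2 - 65
    matrix.modify i.toNat (fun row => row.modify j.toNat (· + 1))

def build_substitution_matrix_py (mappings : List (List (String × String))) : List (List Int) :=
  let matrix := pvAlphabet.map (fun _ => pvAlphabet.map (fun _ => (0 : Int)))
  mappings.foldl (fun matrix mapping => mapping.foldl pvStepA matrix) matrix

-- ===== PORT B =====
def build_substitution_matrix_py_alt (mappings : List (List (String × String))) : List (List Int) :=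
  let pairs := mappings.flatMap (fun mapping =>
    mapping.filter (fun p => pvAlphabet.contains p.1 && pvAlphabet.contains p.2))
  (PySem.List.pyRange 0 26 1).map (fun i =>
    (PySem.List.pyRange 0 26 1).map (fun j =>
      PySem.List.count pairs (pvChr (65 + i), pvChr (65 + j))))

-- ===== PRECONDITION & SPEC =====
def Spec_build_substitution_matrix_py (mappings : List (List (String × String))) (out : List (List Int)) : Prop := out = build_substitution_matrix_py_alt mappings
instance (mappings : List (List (String × String))) (out : List (List Int)) : Decidable (Spec_build_substitution_matrix_py mappings out) := by unfold Spec_build_substitution_matrix_py; infer_instance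

-- ===== CLAIM =====
def Claim_equal_build_substitution_matrix_py : Prop := ∀ (mappings : List (List (String × String))), Dom_build_substitution_matrix_py mappings → Spec_build_substitution_matrix_py mappings (build_substitution_matrix_py mappings)

-- ===== LEMMAS AND PROOFS =====

-- the 26x26 grid holding F (i, j) at row i, column j
def pvMk (F : Int × Int → Int) : List (List Int) :=
  (List.range 26).map (fun i : Nat =>
    (List.range 26).map (fun j : Nat => F ((i : Int), (j : Int))))

-- the valid pairs of all mappings, flattened
def pvPairs (mappings : List (List (String × String))) : List (String × String) :=
  mappings.flatMap (fun mapping =>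
    mapping.filter (fun p => pvAlphabet.contains p.1 && pvAlphabet.contains p.2))

-- valid pairs turned into 0-based index keys
def pvKeys (mappings : List (List (String × String))) : List (Int × Int) :=
  mappings.flatMap (fun mapping =>
    (mapping.filter (fun p => pvAlphabet.contains p.1 && pvAlphabet.contains p.2)).map
      (fun p => (pvOrd p.1 - 65, pvOrd p.2 - 65)))

lemma pvOrd_bound (s : String) (h : pvAlphabet.contains s = true) :
    0 ≤ pvOrd s - 65 ∧ pvOrd s - 65 < 26 := by
  have hm : s ∈ pvAlphabet := List.contains_iff_mem.mp h
  fin_cases hm <;> decide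

lemma pvChr_pvOrd (s : String) (h : pvAlphabet.contains s = true) :
    pvChr (pvOrd s) = s := by
  have hm : s ∈ pvAlphabet := List.contains_iff_mem.mp h
  fin_cases hm <;> decide

lemma pvOrd_pvChr (i : Nat) (hi : i < 26) :
    pvOrd (pvChr (65 + (i : Int))) = 65 + (i : Int) := by
  interval_cases i <;> decide

lemma pvKey_iff (p : String × String) (h1 : pvAlphabet.contains p.1 = true)
    (h2 : pvAlphabet.contains p.2 = true) (i j : Nat) (hi : i < 26) (hj : j < 26) :
    ((pvOrd p.1 - 65, pvOrd p.2 - 65) = ((i : Int), (j : Int))) ↔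
      (p = (pvChr (65 + (i : Int)), pvChr (65 + (j : Int)))) := by
  constructor
  · intro h
    have ha : pvOrd p.1 - 65 = (i : Int) := congrArg Prod.fst h
    have hb : pvOrd p.2 - 65 = (j : Int) := congrArg Prod.snd h
    have ha' : pvOrd p.1 = 65 + (i : Int) := by omega
    have hb' : pvOrd p.2 = 65 + (j : Int) := by omega
    have e1 : p.1 = pvChr (65 + (i : Int)) := by rw [← ha', pvChr_pvOrd p.1 h1]
    have e2 : p.2 = pvChr (65 + (j : Int)) := by rw [← hb', pvChr_pvOrd p.2 h2]
    exact Prod.ext_iff.mpr ⟨e1, e2⟩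
  · intro h
    obtain ⟨e1, e2⟩ := Prod.ext_iff.mp h
    have := pvOrd_pvChr i hi
    have := pvOrd_pvChr j hj
    rw [Prod.ext_iff]
    constructor <;> simp only [e1, e2] <;> omega

lemma pvCount_map (l : List (String × String))
    (hval : ∀ p ∈ l, (pvAlphabet.contains p.1 && pvAlphabet.contains p.2) = true)
    (i j : Nat) (hi : i < 26) (hj : j < 26) :
    l.count (pvChr (65 + (i : Int)), pvChr (65 + (j : Int))) =
      (l.map (fun p => (pvOrd p.1 - 65, pvOrd p.2 - 65))).count ((i : Int), (j : Int)) := by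
  induction l with
  | nil => simp
  | cons p rest ih =>
    have hp := hval p (List.mem_cons_self)
    have h1 : pvAlphabet.contains p.1 = true := (Bool.and_eq_true _ _).mp hp |>.1
    have h2 : pvAlphabet.contains p.2 = true := (Bool.and_eq_true _ _).mp hp |>.2
    have ihr := ih (fun q hq => hval q (List.mem_cons_of_mem p hq))
    simp only [List.map_cons, List.count_cons, ihr]
    congr 1
    have hiff := pvKey_iff p h1 h2 i j hi hj
    by_cases hk : (pvOrd p.1 - 65, pvOrd p.2 - 65) = ((i : Int), (j : Int))
    · rw [if_pos (beq_iff_eq.mpr hk), if_pos (beq_iff_eq.mpr (hiff.mp hk))]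
    · have hk' := hiff.not.mp hk
      rw [if_neg (fun hb => hk (beq_iff_eq.mp hb)), if_neg (fun hb => hk' (beq_iff_eq.mp hb))]

lemma pvMk_congr (F G : Int × Int → Int) (h : ∀ k, F k = G k) : pvMk F = pvMk G := by
  unfold pvMk
  exact List.map_congr_left (fun i _ => List.map_congr_left (fun j _ => h _))

lemma pvMk_length (F : Int × Int → Int) : (pvMk F).length = 26 := by
  simp [pvMk]

lemma pvMk_getElem (F : Int × Int → Int) (a b : Nat)
    (h1 : a < (pvMk F).length) (h2 : b < (pvMk F)[a].length) :
    (pvMk F)[a][b] = F ((a : Int), (b : Int)) := by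
  simp [pvMk]

lemma pvMk_row_length (F : Int × Int → Int) (a : Nat) (h : a < (pvMk F).length) :
    (pvMk F)[a].length = 26 := by
  simp [pvMk]

lemma pvMk_modify (F : Int × Int → Int) (i j : Int)
    (hi0 : 0 ≤ i) (_hi : i < 26) (hj0 : 0 ≤ j) (_hj : j < 26) :
    (pvMk F).modify i.toNat (fun row => row.modify j.toNat (· + 1)) =
      pvMk (fun k => if k = (i, j) then F k + 1 else F k) := by
  have hcast : ((i.toNat : Int)) = i := Int.toNat_of_nonneg hi0
  have hcj : ((j.toNat : Int)) = j := Int.toNat_of_nonneg hj0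
  apply List.ext_getElem
  · rw [List.length_modify, pvMk_length, pvMk_length]
  intro n h1 h2
  rw [List.getElem_modify]
  by_cases hni : i.toNat = n
  · rw [if_pos hni]
    subst hni
    apply List.ext_getElem
    · rw [List.length_modify,
        pvMk_row_length F _ (by rwa [List.length_modify] at h1),
        pvMk_row_length _ _ h2]
    intro m hm1 hm2
    rw [List.getElem_modify]
    by_cases hmj : j.toNat = m
    · rw [if_pos hmj]
      subst hmj
      simp only [pvMk_getElem]
      rw [hcast, hcj, if_pos rfl]
    · rw [if_neg hmj]
      simp only [pvMk_getElem]
      rw [hcast]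
      have hne : ¬ ((i, (m : Int)) = (i, j)) := by
        intro hcontra
        apply hmj
        have h2' : (m : Int) = j := (Prod.ext_iff.mp hcontra).2
        omega
      rw [if_neg hne]
  · rw [if_neg hni]
    apply List.ext_getElem
    · rw [pvMk_row_length F _ (by rwa [List.length_modify] at h1),
        pvMk_row_length _ _ h2]
    intro m hm1 hm2
    simp only [pvMk_getElem]
    have hne : ¬ (((n : Int), (m : Int)) = (i, j)) := by
      intro hcontra
      apply hni
      have h1' : (n : Int) = i := (Prod.ext_iff.mp hcontra).1
      omega
    rw [if_neg hne]

lemma pvStepA_mk (F : Int × Int → Int) (p : String × String) :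
    pvStepA (pvMk F) p =
      pvMk (fun k =>
        F k + if (pvAlphabet.contains p.1 && pvAlphabet.contains p.2) = true
              then (if k = (pvOrd p.1 - 65, pvOrd p.2 - 65) then 1 else 0) else 0) := by
  unfold pvStepA
  by_cases h1 : pvAlphabet.contains p.1 = true
  · by_cases h2 : pvAlphabet.contains p.2 = true
    · have hv : (pvAlphabet.contains p.1 && pvAlphabet.contains p.2) = true := by
        rw [h1, h2]; rfl
      obtain ⟨hi0, hi⟩ := pvOrd_bound p.1 h1
      obtain ⟨hj0, hj⟩ := pvOrd_bound p.2 h2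
      rw [if_neg (by rw [h1, h2]; simp)]
      rw [pvMk_modify F _ _ hi0 hi hj0 hj]
      apply pvMk_congr
      intro k
      rw [if_pos hv]
      by_cases hk : k = (pvOrd p.1 - 65, pvOrd p.2 - 65)
      · rw [if_pos hk, if_pos hk]
      · rw [if_neg hk, if_neg hk, add_zero]
    · have h2f : pvAlphabet.contains p.2 = false := by
        cases h : pvAlphabet.contains p.2
        · rfl
        · exact absurd h h2
      rw [if_pos (by rw [h2f]; simp)]
      apply pvMk_congr
      intro k
      rw [if_neg (by rw [h2f]; simp), add_zero]
  · have h1f : pvAlphabet.contains p.1 = false := by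
      cases h : pvAlphabet.contains p.1
      · rfl
      · exact absurd h h1
    rw [if_pos (by rw [h1f]; simp)]
    apply pvMk_congr
    intro k
    rw [if_neg (by rw [h1f]; simp), add_zero]

lemma pvFold_inner (m : List (String × String)) :
    ∀ F : Int × Int → Int,
      m.foldl pvStepA (pvMk F) =
        pvMk (fun k => F k + ((pvKeys [m]).count k : Int)) := by
  induction m with
  | nil =>
    intro F
    simp only [List.foldl_nil]
    apply pvMk_congr
    intro k
    simp [pvKeys]
  | cons p rest ih =>
    intro F
    simp only [List.foldl_cons]
    rw [pvStepA_mk, ih]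
    apply pvMk_congr
    intro k
    simp only [pvKeys, List.flatMap_cons, List.flatMap_nil, List.append_nil,
      List.filter_cons]
    by_cases hv : (pvAlphabet.contains p.1 && pvAlphabet.contains p.2) = true
    · rw [if_pos hv, if_pos hv, List.map_cons, List.count_cons]
      by_cases hk : k = (pvOrd p.1 - 65, pvOrd p.2 - 65)
      · have hbeq : ((pvOrd p.1 - 65, pvOrd p.2 - 65) == k) = true := by
          rw [hk]; exact beq_self_eq_true _
        rw [if_pos hk]
        simp only [hbeq, if_true]
        push_cast
        ring
      · have hbeq : ((pvOrd p.1 - 65, pvOrd p.2 - 65) == k) = false := by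
          rw [beq_eq_false_iff_ne]
          exact fun h => hk h.symm
        rw [if_neg hk]
        simp only [hbeq]
        push_cast
        ring
    · rw [if_neg hv, if_neg hv, add_zero]

lemma pvFold_outer (mappings : List (List (String × String))) :
    ∀ F : Int × Int → Int,
      mappings.foldl (fun matrix mapping => mapping.foldl pvStepA matrix) (pvMk F) =
        pvMk (fun k => F k + ((pvKeys mappings).count k : Int)) := by
  induction mappings with
  | nil =>
    intro F
    simp only [List.foldl_nil]
    apply pvMk_congr
    intro k
    simp [pvKeys]
  | cons m rest ih =>
    intro F
    simp only [List.foldl_cons]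
    rw [pvFold_inner m F, ih]
    apply pvMk_congr
    intro k
    have hsplit : pvKeys (m :: rest) = pvKeys [m] ++ pvKeys rest := by
      simp [pvKeys]
    rw [hsplit, List.count_append]
    push_cast
    ring

lemma pvKeys_eq_map (mappings : List (List (String × String))) :
    pvKeys mappings = (pvPairs mappings).map (fun p => (pvOrd p.1 - 65, pvOrd p.2 - 65)) := by
  simp [pvKeys, pvPairs, List.map_flatMap]

lemma pvPairs_valid (mappings : List (List (String × String))) :
    ∀ p ∈ pvPairs mappings, (pvAlphabet.contains p.1 && pvAlphabet.contains p.2) = true := by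
  intro p hp
  simp only [pvPairs, List.mem_flatMap] at hp
  obtain ⟨m, _, hpm⟩ := hp
  exact (List.mem_filter.mp hpm).2

lemma pvAlt_eq_mk (mappings : List (List (String × String))) :
    build_substitution_matrix_py_alt mappings =
      pvMk (fun k => ((pvKeys mappings).count k : Int)) := by
  unfold build_substitution_matrix_py_alt pvMk
  have hr : PySem.List.pyRange 0 26 1 =
      (List.range 26).map (fun n : Nat => (n : Int)) := by decide
  rw [hr, List.map_map]
  apply List.map_congr_left
  intro i hi
  simp only [Function.comp_apply]
  rw [List.map_map]
  apply List.map_congr_left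
  intro j hj
  simp only [Function.comp_apply]
  rw [PySem.List.count_eq]
  rw [show List.flatMap (fun mapping => List.filter (fun p => pvAlphabet.contains p.1 && pvAlphabet.contains p.2) mapping) mappings = pvPairs mappings from rfl]
  rw [pvCount_map (pvPairs mappings) (pvPairs_valid mappings) i j
      (List.mem_range.mp hi) (List.mem_range.mp hj)]
  rw [← pvKeys_eq_map]

lemma pvInit_eq_mk :
    pvAlphabet.map (fun _ => pvAlphabet.map (fun _ => (0 : Int))) = pvMk (fun _ => 0) := by
  decide

-- ===== VERDICT =====
theorem build_substitution_matrix_py_spec : Claim_equal_build_substitution_matrix_py := by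
  intro mappings _
  show build_substitution_matrix_py mappings = build_substitution_matrix_py_alt mappings
  unfold build_substitution_matrix_py
  rw [pvInit_eq_mk, pvFold_outer mappings (fun _ => 0), pvAlt_eq_mk]
  apply pvMk_congr
  intro k
  ring
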